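-- pv_equiv track=rewrite | github.com/GabriD-0/entregas-urbana-ai | source/pathfinder.py | obstaculos
-- ===== SOURCE A (Python) =====
-- from typing import Dict, List, Set, Tuple, Callable
--
-- Coord    = Tuple[int, int] # (row, col) da célula
--
-- def obstaculos(a: Coord, b: Coord, is_road: Dict[Coord, bool]) -> int:
--     r1, c1 = a
--     r2, c2 = b
--
--     rmin, rmax = sorted((r1, r2))
--     cmin, cmax = sorted((c1, c2))
--
--     conta = 0
--
--     for r in range(rmin, rmax + 1):
--         for c in range(cmin, cmax + 1):
--             if (r, c) not in is_road or not is_road[(r, c)]: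
--                 conta += 1
--
--     return conta
-- ===== SOURCE B (Python) =====
-- def obstaculos(a, b, is_road):
--     r1, c1 = a
--     r2, c2 = b
--     rmin, rmax = min(r1, r2), max(r1, r2)
--     cmin, cmax = min(c1, c2), max(c1, c2)
--     area = (rmax - rmin + 1) * (cmax - cmin + 1)
--     roads = 0
--     for (r, c), v in is_road.items():
--         if v and rmin <= r <= rmax and cmin <= c <= cmax:
--             roads += 1
--     return area - roads
-- ===== Notes on version B (the rewrite author's own statement) =====
-- stated objective: faster
-- what changed: B computes the rectangle area in closed form and subtracts a single pass over the dict counting True road entries inside the rectangle, instead of scanning every cell of the rectangle.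
import Mathlib
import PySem

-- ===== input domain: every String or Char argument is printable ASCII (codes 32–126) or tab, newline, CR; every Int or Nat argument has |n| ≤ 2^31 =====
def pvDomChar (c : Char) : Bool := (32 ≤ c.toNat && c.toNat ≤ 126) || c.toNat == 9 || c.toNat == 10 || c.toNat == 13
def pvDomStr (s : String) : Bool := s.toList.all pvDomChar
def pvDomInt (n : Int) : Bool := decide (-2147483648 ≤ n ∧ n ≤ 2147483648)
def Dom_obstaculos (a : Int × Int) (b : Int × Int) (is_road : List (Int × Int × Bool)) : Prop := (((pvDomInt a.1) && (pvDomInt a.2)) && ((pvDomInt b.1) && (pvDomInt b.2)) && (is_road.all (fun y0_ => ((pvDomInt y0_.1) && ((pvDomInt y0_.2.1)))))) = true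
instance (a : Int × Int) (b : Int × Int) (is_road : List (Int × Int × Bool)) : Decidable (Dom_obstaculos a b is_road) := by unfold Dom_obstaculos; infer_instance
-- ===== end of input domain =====

-- B replaces A's cell-by-cell scan of the whole rectangle by area-minus-(one pass over the
-- dict counting True road entries inside the rectangle): asymptotically faster (O(|is_road|) vs O(area)).


-- ===== PORT A =====
-- first-match lookup on the association list: '(r, c) in is_road' / 'is_road[(r, c)]'
def pvLuk (L : List (Int × Int × Bool)) (r c : Int) : Option Bool :=
  match L with
  | [] => none
  | e :: t => if e.1 = r ∧ e.2.1 = c then some e.2.2 else pvLuk t r c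

def obstaculos (a : Int × Int) (b : Int × Int) (is_road : List (Int × Int × Bool)) : Int :=
  let r1 := a.1; let c1 := a.2
  let r2 := b.1; let c2 := b.2
  let rmin := min r1 r2; let rmax := max r1 r2   -- sorted((r1, r2)) of a pair
  let cmin := min c1 c2; let cmax := max c1 c2
  (PySem.List.pyRange rmin (rmax + 1) 1).foldl (fun conta r =>
    (PySem.List.pyRange cmin (cmax + 1) 1).foldl (fun conta c =>
      if pvLuk is_road r c ≠ some true then conta + 1 else conta) conta) 0

-- ===== PORT B =====
-- loop of Source B over is_road.items(); under the assoc-list convention (lookup = first match) the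
-- dict's items are the FIRST entry for each key, realised here with a seen-keys set.
def pvRoadsLoop (L : List (Int × Int × Bool)) (rmin rmax cmin cmax : Int)
    (st : PySem.Set (Int × Int) × Int) : PySem.Set (Int × Int) × Int :=
  match L with
  | [] => st
  | e :: t =>
      if (e.1, e.2.1) ∈ st.1 then pvRoadsLoop t rmin rmax cmin cmax st
      else
        pvRoadsLoop t rmin rmax cmin cmax
          (PySem.Set.add st.1 (e.1, e.2.1),
           if e.2.2 && decide (rmin ≤ e.1 ∧ e.1 ≤ rmax ∧ cmin ≤ e.2.1 ∧ e.2.1 ≤ cmax)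
           then st.2 + 1 else st.2)

def obstaculos_alt (a : Int × Int) (b : Int × Int) (is_road : List (Int × Int × Bool)) : Int :=
  let rmin := min a.1 b.1; let rmax := max a.1 b.1
  let cmin := min a.2 b.2; let cmax := max a.2 b.2
  let area := (rmax - rmin + 1) * (cmax - cmin + 1)
  let roads := (pvRoadsLoop is_road rmin rmax cmin cmax ([], 0)).2
  area - roads

-- ===== PRECONDITION & SPEC =====
def Spec_obstaculos (a : Int × Int) (b : Int × Int) (is_road : List (Int × Int × Bool)) (out : Int) : Prop := out = obstaculos_alt a b is_road
instance (a : Int × Int) (b : Int × Int) (is_road : List (Int × Int × Bool)) (out : Int) : Decidable (Spec_obstaculos a b is_road out) := by unfold Spec_obstaculos; infer_instance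

-- ===== CLAIM (what is proved, stated in full; the proofs are below) =====
def Claim_equal_obstaculos : Prop := ∀ (a : Int × Int) (b : Int × Int) (is_road : List (Int × Int × Bool)), Dom_obstaculos a b is_road → Spec_obstaculos a b is_road (obstaculos a b is_road)


-- ===== LEMMAS AND PROOFS =====

def pvKey (e : Int × Int × Bool) : Int × Int := (e.1, e.2.1)

-- the set of distinct road cells of L inside the rectangle whose key is not yet seen
def pvS (rmin rmax cmin cmax : Int) (L : List (Int × Int × Bool)) (s : List (Int × Int)) : Finset (Int × Int) :=
  (L.map pvKey).toFinset.filter fun k =>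
    k ∉ s ∧ pvLuk L k.1 k.2 = some true ∧ rmin ≤ k.1 ∧ k.1 ≤ rmax ∧ cmin ≤ k.2 ∧ k.2 ≤ cmax

theorem pvLuk_mem {L : List (Int × Int × Bool)} {r c : Int} {v : Bool}
    (h : pvLuk L r c = some v) : (r, c) ∈ L.map pvKey := by
  induction L with
  | nil => simp [pvLuk] at h
  | cons e t ih =>
      simp only [pvLuk] at h
      by_cases he : e.1 = r ∧ e.2.1 = c
      · simp [pvKey, he.1, he.2]
      · simp only [if_neg he] at h
        simp [pvKey, ih h]

theorem pvRoadsLoop_eq (rmin rmax cmin cmax : Int) :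
    ∀ (L : List (Int × Int × Bool)) (s : PySem.Set (Int × Int)) (n : Int),
    (pvRoadsLoop L rmin rmax cmin cmax (s, n)).2 = n + (pvS rmin rmax cmin cmax L s).card := by
  intro L
  induction L with
  | nil => intro s n; simp [pvRoadsLoop, pvS]
  | cons e t ih =>
      intro s n
      by_cases hmem : (e.1, e.2.1) ∈ s
      · rw [show pvRoadsLoop (e :: t) rmin rmax cmin cmax (s, n)
              = pvRoadsLoop t rmin rmax cmin cmax (s, n) by simp [pvRoadsLoop, hmem]]
        rw [ih s n]
        have hset2 : pvS rmin rmax cmin cmax (e :: t) s = pvS rmin rmax cmin cmax t s := by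
          apply Finset.ext
          intro k
          simp only [pvS, Finset.mem_filter, List.map_cons, List.mem_toFinset, List.mem_cons]
          constructor
          · rintro ⟨hk, hns, hl, hb⟩
            have hne : pvKey e ≠ k := fun h => hns (h ▸ hmem)
            have hl' : pvLuk t k.1 k.2 = some true := by
              rw [show pvLuk (e :: t) k.1 k.2 = pvLuk t k.1 k.2 by
                simp only [pvLuk]; rw [if_neg]; intro h
                exact hne (Prod.ext_iff.mpr ⟨h.1, h.2⟩)] at hl
              exact hl
            exact ⟨hk.resolve_left (fun h => hne h.symm), hns, hl', hb⟩
          · rintro ⟨hk, hns, hl, hb⟩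
            have hne : pvKey e ≠ k := fun h => hns (h ▸ hmem)
            refine ⟨Or.inr hk, hns, ?_, hb⟩
            simp only [pvLuk]
            rw [if_neg]
            · exact hl
            · intro h; exact hne (Prod.ext_iff.mpr ⟨h.1, h.2⟩)
        rw [hset2]
      · have hcond : pvRoadsLoop (e :: t) rmin rmax cmin cmax (s, n)
            = pvRoadsLoop t rmin rmax cmin cmax
                (PySem.Set.add s (e.1, e.2.1),
                 if e.2.2 && decide (rmin ≤ e.1 ∧ e.1 ≤ rmax ∧ cmin ≤ e.2.1 ∧ e.2.1 ≤ cmax)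
                 then n + 1 else n) := by
          simp [pvRoadsLoop, hmem]
        rw [hcond, ih]
        have hset : pvS rmin rmax cmin cmax (e :: t) s
            = (if e.2.2 && decide (rmin ≤ e.1 ∧ e.1 ≤ rmax ∧ cmin ≤ e.2.1 ∧ e.2.1 ≤ cmax)
               then insert (e.1, e.2.1) (pvS rmin rmax cmin cmax t (PySem.Set.add s (e.1, e.2.1)))
               else pvS rmin rmax cmin cmax t (PySem.Set.add s (e.1, e.2.1))) := by
          apply Finset.ext
          intro k
          by_cases hke : k = (e.1, e.2.1)
          · subst hke
            have hlE : pvLuk (e :: t) e.1 e.2.1 = some e.2.2 := by simp [pvLuk]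
            have hnotR : (e.1, e.2.1) ∉ pvS rmin rmax cmin cmax t (PySem.Set.add s (e.1, e.2.1)) := by
              simp [pvS, PySem.Set.mem_add]
            by_cases hc : (e.2.2 && decide (rmin ≤ e.1 ∧ e.1 ≤ rmax ∧ cmin ≤ e.2.1 ∧ e.2.1 ≤ cmax)) = true
            · rw [if_pos hc]
              simp only [Bool.and_eq_true, decide_eq_true_eq] at hc
              simp [pvS, pvKey, hlE, hmem, hc.1, hc.2, Finset.mem_insert]
            · rw [if_neg hc]
              simp only [Bool.and_eq_true, decide_eq_true_eq, not_and_or] at hc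
              simp only [pvS, Finset.mem_filter, List.map_cons, List.mem_toFinset, List.mem_cons,
                PySem.Set.mem_add]
              constructor
              · rintro ⟨-, -, hl, hb⟩
                rw [hlE] at hl
                rcases hc with hv | hb'
                · exact absurd (Option.some.inj hl) (by simpa using hv)
                · exact absurd hb (by tauto)
              · rintro ⟨-, hns, -, -⟩
                exact absurd (Or.inr trivial) hns
          · have hl : pvLuk (e :: t) k.1 k.2 = pvLuk t k.1 k.2 := by
              simp only [pvLuk]
              rw [if_neg]
              intro h
              exact hke (Prod.ext_iff.mpr ⟨h.1.symm, h.2.symm⟩)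
            have hkm : k ∈ (e :: t).map pvKey ↔ k ∈ t.map pvKey := by
              simp only [List.map_cons, List.mem_cons]
              constructor
              · rintro (h | h)
                · exact absurd (by simpa [pvKey] using h) hke
                · exact h
              · exact Or.inr
            have hs' : k ∉ PySem.Set.add s (e.1, e.2.1) ↔ k ∉ s := by
              rw [PySem.Set.mem_add]
              tauto
            split
            · rw [Finset.mem_insert]
              simp only [pvS, Finset.mem_filter, List.mem_toFinset, hl, hs', hkm]
              tauto
            · simp only [pvS, Finset.mem_filter, List.mem_toFinset, hl, hs', hkm]
        rw [hset]
        by_cases hc : (e.2.2 && decide (rmin ≤ e.1 ∧ e.1 ≤ rmax ∧ cmin ≤ e.2.1 ∧ e.2.1 ≤ cmax)) = true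
        · rw [if_pos hc, if_pos hc, Finset.card_insert_of_notMem (by simp [pvS, PySem.Set.mem_add])]
          push_cast
          ring
        · rw [if_neg hc, if_neg hc]

-- sum of per-row counts is the count over the row-column product
theorem pvSum_countP (p : Int → Int → Bool) (C : List Int) :
    ∀ R : List Int,
    (R.map (fun r => ((C.countP (p r) : Nat) : Int))).sum
      = (((R ×ˢ C).countP (fun k => p k.1 k.2) : Nat) : Int) := by
  intro R
  induction R with
  | nil => simp
  | cons r R ih =>
      simp only [List.map_cons, List.sum_cons, ih]
      have : (r :: R) ×ˢ C = C.map (Prod.mk r) ++ R ×ˢ C := rfl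
      rw [this, List.countP_append, List.countP_map]
      simp only [Function.comp_def]
      push_cast
      ring

theorem pvSum_sub (cl : Int) (y : Int → Int) :
    ∀ R : List Int, (R.map (fun r => cl - y r)).sum = R.length * cl - (R.map y).sum := by
  intro R
  induction R with
  | nil => simp
  | cons r R ih => simp only [List.map_cons, List.sum_cons, ih, List.length_cons]; push_cast; ring

theorem pvMain (rmin rmax cmin cmax : Int) (hr : rmin ≤ rmax) (hc : cmin ≤ cmax)
    (L : List (Int × Int × Bool)) :
    (PySem.List.pyRange rmin (rmax + 1) 1).foldl (fun conta r =>
        (PySem.List.pyRange cmin (cmax + 1) 1).foldl (fun conta c =>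
          if pvLuk L r c ≠ some true then conta + 1 else conta) conta) 0
      = (rmax - rmin + 1) * (cmax - cmin + 1) - (pvRoadsLoop L rmin rmax cmin cmax ([], 0)).2 := by
  have hloop := pvRoadsLoop_eq rmin rmax cmin cmax L [] 0
  set R := PySem.List.pyRange rmin (rmax + 1) 1 with hR
  set C := PySem.List.pyRange cmin (cmax + 1) 1 with hC
  simp only [PySem.List.foldl_ite_add_one, PySem.List.foldl_add]
  -- per-row complement: "not road" count = |C| - "road" count
  have hrow : ∀ r : Int,
      (C.countP (fun c => decide (pvLuk L r c ≠ some true)) : Int)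
        = (C.length : Int) - (C.countP (fun c => decide (pvLuk L r c = some true)) : Int) := by
    intro r
    have h := List.length_eq_countP_add_countP (fun c => decide (pvLuk L r c = some true)) (l := C)
    have he : (fun c => decide ¬(decide (pvLuk L r c = some true)) = true)
        = (fun c => decide (pvLuk L r c ≠ some true)) := by
      funext c; simp
    rw [he] at h
    omega
  have hmap : (R.map (fun r => ((C.countP (fun c => decide (pvLuk L r c ≠ some true)) : Nat) : Int)))
      = R.map (fun r => (C.length : Int) - ((C.countP (fun c => decide (pvLuk L r c = some true)) : Nat) : Int)) := by
    apply List.map_congr_left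
    intro r _
    exact hrow r
  rw [hmap, pvSum_sub ((C.length : Nat) : Int)
        (fun r => ((C.countP (fun c => decide (pvLuk L r c = some true)) : Nat) : Int)) R]
  rw [pvSum_countP (fun r c => decide (pvLuk L r c = some true)) C R]
  -- the product count is the card of the road-cell set
  have hfin : ((R ×ˢ C).countP (fun k => decide (pvLuk L k.1 k.2 = some true)) : Nat)
      = (pvS rmin rmax cmin cmax L []).card := by
    rw [List.countP_eq_length_filter,
        ← List.toFinset_card_of_nodup
          (((PySem.List.nodup_pyRange_one _ _).product (PySem.List.nodup_pyRange_one _ _)).filter _)]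
    congr 1
    apply Finset.ext
    rintro ⟨k1, k2⟩
    simp only [List.mem_toFinset, List.mem_filter, List.mem_product,
      PySem.List.mem_pyRange_one, decide_eq_true_eq, pvS, Finset.mem_filter,
      List.not_mem_nil, not_false_iff, true_and]
    constructor
    · rintro ⟨⟨⟨h1, h2⟩, h3, h4⟩, hl⟩
      exact ⟨pvLuk_mem hl, hl, h1, by omega, h3, by omega⟩
    · rintro ⟨-, hl, h1, h2, h3, h4⟩
      exact ⟨⟨⟨h1, by omega⟩, h3, by omega⟩, hl⟩
  have hRlen : ((R.length : Nat) : Int) = rmax - rmin + 1 := by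
    rw [hR, PySem.List.length_pyRange_one]; omega
  have hClen : ((C.length : Nat) : Int) = cmax - cmin + 1 := by
    rw [hC, PySem.List.length_pyRange_one]; omega
  rw [hfin, hloop, hRlen, hClen]
  ring

-- ===== VERDICT (by name: the statement is the Claim_ definition above) =====
theorem obstaculos_spec : Claim_equal_obstaculos := by
  intro a b L _
  unfold Spec_obstaculos obstaculos obstaculos_alt
  simp only []
  exact pvMain (min a.1 b.1) (max a.1 b.1) (min a.2 b.2) (max a.2 b.2)
    (min_le_max) (min_le_max) L
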